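-- pv_equiv track=rewrite | github.com/Keelan002/Captured | scripts/test.py | compare_moves
-- ===== SOURCE A (Python) =====
-- def compare_moves(expected_moves, generated_moves):
--     """
--     Compare expected moves with generated moves.
--
--     Args:
--         expected_moves: List of expected moves
--         generated_moves: List of generated moves
--
--     Returns:
--         List of tuples (expected_move, detected_move, is_correct)
--     """
--     results = []
--
--     # Convert both lists to lowercase for case-insensitive comparison
--     expected_lower = [m.lower() for m in expected_moves]
--     generated_lower = [m.lower() for m in generated_moves]
--
--     # Compare moves
--     for i, expected in enumerate(expected_moves):
--         if i < len(generated_moves):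
--             # We have a corresponding generated move
--             generated = generated_moves[i]
--             is_correct = expected_lower[i] == generated_lower[i]
--             results.append((expected, generated, is_correct))
--         else:
--             # Missing move in generated PGN
--             results.append((expected, None, False))
--
--     # Add any extra moves in generated PGN
--     for i in range(len(expected_moves), len(generated_moves)):
--         results.append((None, generated_moves[i], False))
--
--     return results
-- ===== SOURCE B (Python) =====
-- def compare_moves(expected_moves, generated_moves):
--     """
--     Compare expected moves with generated moves.
--
--     Returns:
--         List of tuples (expected_move, detected_move, is_correct)
--     """
--     es = list(expected_moves)
--     gs = list(generated_moves)
--     out = []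
--     # Build the result back-to-front by consuming the lists from their tail
--     # ends with pop(): first the unmatched tail (at most one of these two
--     # trimming loops runs), then the aligned pairs, then one final reverse.
--     while len(es) > len(gs):
--         out.append((es.pop(), None, False))
--     while len(gs) > len(es):
--         out.append((None, gs.pop(), False))
--     while es:
--         e = es.pop()
--         g = gs.pop()
--         out.append((e, g, e.lower() == g.lower()))
--     out.reverse()
--     return out
-- ===== Notes on version B (the rewrite author's own statement) =====
-- stated objective: alternative
-- what changed: Instead of two index-driven forward loops over precomputed lowercase lists, B consumes working copies of both lists destructively from the tail with pop(): two trimming loops emit the unmatched tail, a third loop pairs and compares lowering each pair on the fly, building the result back-to-front and reversing once at the end.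
import Mathlib
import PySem

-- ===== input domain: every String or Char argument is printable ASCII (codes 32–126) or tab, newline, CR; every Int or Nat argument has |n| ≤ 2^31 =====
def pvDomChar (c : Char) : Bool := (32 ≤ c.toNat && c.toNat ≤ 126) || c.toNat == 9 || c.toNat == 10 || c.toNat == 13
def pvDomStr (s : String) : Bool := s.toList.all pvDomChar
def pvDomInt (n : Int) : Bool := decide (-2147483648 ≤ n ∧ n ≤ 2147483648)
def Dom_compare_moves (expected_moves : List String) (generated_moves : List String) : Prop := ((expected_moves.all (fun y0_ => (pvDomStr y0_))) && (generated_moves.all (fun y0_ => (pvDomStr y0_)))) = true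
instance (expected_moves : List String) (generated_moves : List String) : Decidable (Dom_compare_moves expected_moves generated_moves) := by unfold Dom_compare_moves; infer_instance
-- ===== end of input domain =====

-- B replaces A's index-driven forward loops over precomputed lowercase lists by
-- destructive tail consumption: pop()-based trimming and pairing loops build the
-- result back-to-front, reversed once at the end (alternative; same cost).


-- ===== PORT A =====
def compare_moves (expected_moves : List String) (generated_moves : List String) : List (Option String × Option String × Bool) :=
  let expected_lower := expected_moves.map PySem.Str.lower
  let generated_lower := generated_moves.map PySem.Str.lower
  let results :=
    (PySem.List.enumerate expected_moves 0).foldl (fun acc p =>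
      if p.1 < (generated_moves.length : Int) then
        acc ++ [((some p.2 : Option String),
                 (some (PySem.List.pyGetD generated_moves p.1 "") : Option String),
                 PySem.List.pyGetD expected_lower p.1 "" == PySem.List.pyGetD generated_lower p.1 "")]
      else
        acc ++ [((some p.2 : Option String), (none : Option String), false)]) []
  (PySem.List.pyRange (expected_moves.length : Int) (generated_moves.length : Int) 1).foldl
    (fun acc i =>
      acc ++ [((none : Option String),
               (some (PySem.List.pyGetD generated_moves i "") : Option String), false)]) results

-- ===== PORT B =====
-- while len(es) > len(gs): out.append((es.pop(), None, False))
def cmLoop1 (es gs : List String) (out : List (Option String × Option String × Bool)) :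
    List String × List (Option String × Option String × Bool) :=
  if gs.length < es.length then
    match hp : PySem.List.pop? es (-1) with
    | some (e, es') => cmLoop1 es' gs (out ++ [((some e : Option String), (none : Option String), false)])
    | none => (es, out)   -- unreachable: es is nonempty here, so pop() cannot fail
  else (es, out)
termination_by es.length
decreasing_by
  have := PySem.List.length_of_pop?_eq_some es hp
  simp at this ⊢; omega

-- while len(gs) > len(es): out.append((None, gs.pop(), False))
def cmLoop2 (es gs : List String) (out : List (Option String × Option String × Bool)) :
    List String × List (Option String × Option String × Bool) :=
  if es.length < gs.length then
    match hp : PySem.List.pop? gs (-1) with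
    | some (g, gs') => cmLoop2 es gs' (out ++ [((none : Option String), (some g : Option String), false)])
    | none => (gs, out)   -- unreachable: gs is nonempty here, so pop() cannot fail
  else (gs, out)
termination_by gs.length
decreasing_by
  have := PySem.List.length_of_pop?_eq_some gs hp
  simp at this ⊢; omega

-- while es: e = es.pop(); g = gs.pop(); out.append((e, g, e.lower() == g.lower()))
-- (pop? es (-1) = none exactly when es is empty, i.e. it encodes the loop test)
def cmLoop3 (es gs : List String) (out : List (Option String × Option String × Bool)) :
    List (Option String × Option String × Bool) :=
  match hp : PySem.List.pop? es (-1) with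
  | some (e, es') =>
    match PySem.List.pop? gs (-1) with
    | some (g, gs') =>
      cmLoop3 es' gs' (out ++ [((some e : Option String), (some g : Option String),
                                PySem.Str.lower e == PySem.Str.lower g)])
    | none => out   -- unreachable: the loop is only entered with equal lengths
  | none => out
termination_by es.length
decreasing_by
  have := PySem.List.length_of_pop?_eq_some es hp
  simp at this ⊢; omega

def compare_moves_alt (expected_moves : List String) (generated_moves : List String) : List (Option String × Option String × Bool) :=
  let es := expected_moves
  let gs := generated_moves
  let out : List (Option String × Option String × Bool) := []
  let r1 := cmLoop1 es gs out
  let r2 := cmLoop2 r1.1 gs r1.2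
  (cmLoop3 r1.1 r2.1 r2.2).reverse

-- ===== PRECONDITION & SPEC =====
def Spec_compare_moves (expected_moves : List String) (generated_moves : List String) (out : List (Option String × Option String × Bool)) : Prop := out = compare_moves_alt expected_moves generated_moves
instance (expected_moves : List String) (generated_moves : List String) (out : List (Option String × Option String × Bool)) : Decidable (Spec_compare_moves expected_moves generated_moves out) := by unfold Spec_compare_moves; infer_instance

-- ===== CLAIM (what is proved, stated in full; the proofs are below) =====
def Claim_equal_compare_moves : Prop := ∀ (expected_moves : List String) (generated_moves : List String), Dom_compare_moves expected_moves generated_moves → Spec_compare_moves expected_moves generated_moves (compare_moves expected_moves generated_moves)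

-- ===== LEMMAS AND PROOFS =====

-- loop shape of A's first loop: append exactly one element per step, chosen by a branch
theorem foldl_append_if_else {α β : Type} (p : α → Prop) [DecidablePred p] (f g : α → β) (l : List α) (acc : List β) :
    l.foldl (fun acc x => if p x then acc ++ [f x] else acc ++ [g x]) acc
      = acc ++ l.map (fun x => if p x then f x else g x) := by
  induction l generalizing acc with
  | nil => simp
  | cons x xs ih => by_cases h : p x <;> simp [h, ih, List.append_assoc]

-- A's tail loop over range(len(EM), len(GM)) enumerates GM's suffix
theorem range_map_eq_drop_map {γ : Type} (f : String → γ) :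
    ∀ (d : Nat) (s : Nat) (GM : List String), GM.length = s + d →
      (PySem.List.pyRange (s : Int) (GM.length : Int) 1).map
          (fun i => f (PySem.List.pyGetD GM i ""))
        = (GM.drop s).map f := by
  intro d
  induction d with
  | zero =>
    intro s GM h
    rw [PySem.List.pyRange_one_eq_nil (by omega)]
    simp [List.drop_eq_nil_iff, h]
  | succ d ih =>
    intro s GM h
    rw [PySem.List.pyRange_one_cons (by exact_mod_cast Nat.lt_of_lt_of_le (by omega) (le_of_eq h.symm))]
    have hs : s < GM.length := by omega
    have hdrop : GM.drop s = GM[s] :: GM.drop (s + 1) := by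
      rw [List.drop_eq_getElem_cons hs]
    have hget : PySem.List.pyGetD GM (s : Int) "" = GM[s] := by
      rw [PySem.List.pyGetD_natCast, List.getD_eq_getElem?_getD, List.getElem?_eq_getElem hs]
      rfl
    have : ((s : Int) + 1) = ((s + 1 : Nat) : Int) := by push_cast; ring
    rw [List.map_cons, hget, hdrop, List.map_cons, this, ih (s+1) GM (by omega)]

-- A's first loop (as a map over enumerate, indexing absolute lists) equals
-- the compared aligned pairs followed by expected's unmatched tail.
theorem part1_eq :
    ∀ (em : List String) (s : Nat) (EM GM : List String) (gm : List String),
      EM.drop s = em → GM.drop s = gm →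
      (PySem.List.enumerate em (s : Int)).map (fun p =>
          if p.1 < (GM.length : Int) then
            ((some p.2 : Option String),
             (some (PySem.List.pyGetD GM p.1 "") : Option String),
             PySem.List.pyGetD (EM.map PySem.Str.lower) p.1 "" ==
               PySem.List.pyGetD (GM.map PySem.Str.lower) p.1 "")
          else ((some p.2 : Option String), (none : Option String), false))
        = (em.zip gm).map
            (fun p => ((some p.1 : Option String), (some p.2 : Option String),
                       PySem.Str.lower p.1 == PySem.Str.lower p.2))
          ++ (em.drop gm.length).map
               (fun e => ((some e : Option String), (none : Option String), false)) := by
  intro em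
  induction em with
  | nil => intro s EM GM gm _ _; simp [PySem.List.enumerate]
  | cons e es ih =>
    intro s EM GM gm hE hG
    rw [PySem.List.enumerate_cons, List.map_cons]
    have hsE : s < EM.length := by
      by_contra h
      rw [List.drop_eq_nil_iff.mpr (by omega)] at hE
      simp at hE
    have hcast : ((s : Int) + 1) = ((s + 1 : Nat) : Int) := by push_cast; ring
    cases gm with
    | nil =>
      have hGlen : GM.length ≤ s := List.drop_eq_nil_iff.mp hG
      have hcond : ¬ ((s : Int) < (GM.length : Int)) := by exact_mod_cast not_lt.mpr hGlen
      have hG' : GM.drop (s + 1) = [] := List.drop_eq_nil_iff.mpr (by omega)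
      have := ih (s + 1) EM GM [] (by rw [← List.drop_drop, hE]; rfl) hG'
      rw [hcast] at *
      simp only [if_neg hcond, this]
      simp
    | cons g gs =>
      have hsG : s < GM.length := by
        by_contra h
        rw [List.drop_eq_nil_iff.mpr (by omega)] at hG
        simp at hG
      have hcond : (s : Int) < (GM.length : Int) := by exact_mod_cast hsG
      have hgetG : PySem.List.pyGetD GM (s : Int) "" = g := by
        rw [PySem.List.pyGetD_natCast, List.getD_eq_getElem?_getD, List.getElem?_eq_getElem hsG]
        have : GM[s] :: GM.drop (s+1) = g :: gs := by rw [← List.drop_eq_getElem_cons hsG, hG]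
        exact (List.cons.injEq _ _ _ _ ▸ this).1
      have hgetE : PySem.List.pyGetD (EM.map PySem.Str.lower) (s : Int) "" = PySem.Str.lower e := by
        rw [PySem.List.pyGetD_natCast, List.getD_eq_getElem?_getD, List.getElem?_map]
        have : EM[s]? = some e := by
          have : (EM.drop s)[0]? = some e := by rw [hE]; rfl
          simpa [List.getElem?_drop] using this
        rw [this]; rfl
      have hgetGL : PySem.List.pyGetD (GM.map PySem.Str.lower) (s : Int) "" = PySem.Str.lower g := by
        rw [PySem.List.pyGetD_natCast, List.getD_eq_getElem?_getD, List.getElem?_map]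
        have : GM[s]? = some g := by
          have : (GM.drop s)[0]? = some g := by rw [hG]; rfl
          simpa [List.getElem?_drop] using this
        rw [this]; rfl
      have hE' : EM.drop (s + 1) = es := by rw [← List.drop_drop, hE]; rfl
      have hG' : GM.drop (s + 1) = gs := by rw [← List.drop_drop, hG]; rfl
      have := ih (s + 1) EM GM gs hE' hG'
      rw [hcast] at *
      simp only [if_pos hcond, hgetG, hgetE, hgetGL, this]
      simp

-- B's first trimming loop: pops expected's excess tail, emitted in reverse
theorem cmLoop1_spec :
    ∀ (l : List String) (gs : List String) (out : List (Option String × Option String × Bool)),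
      cmLoop1 l.reverse gs out
        = ((l.reverse).take gs.length,
           out ++ (((l.reverse).drop gs.length).map
             (fun e => ((some e : Option String), (none : Option String), false))).reverse) := by
  intro l
  induction l with
  | nil => intro gs out; rw [cmLoop1]; simp
  | cons x xs ih =>
    intro gs out
    rw [cmLoop1]
    by_cases h : gs.length < (x :: xs).reverse.length
    · have hlen : gs.length ≤ xs.reverse.length := by simp at h ⊢; omega
      rw [if_pos h]
      split
      · rename_i e es' hp'
        rw [List.reverse_cons, PySem.List.pop?_last] at hp'
        simp only [Option.some.injEq, Prod.mk.injEq] at hp'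
        obtain ⟨rfl, rfl⟩ := hp'
        rw [ih, List.reverse_cons, List.take_append_of_le_length hlen,
            List.drop_append_of_le_length hlen]
        simp [List.append_assoc]
      · rename_i hp'
        rw [List.reverse_cons, PySem.List.pop?_last] at hp'
        simp at hp'
    · have hlen : (x :: xs).reverse.length ≤ gs.length := by omega
      rw [if_neg h]
      rw [List.take_of_length_le hlen, List.drop_eq_nil_of_le hlen]
      simp

-- B's second trimming loop: pops generated's excess tail, emitted in reverse
theorem cmLoop2_spec :
    ∀ (l : List String) (es : List String) (out : List (Option String × Option String × Bool)),
      cmLoop2 es l.reverse out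
        = ((l.reverse).take es.length,
           out ++ (((l.reverse).drop es.length).map
             (fun g => ((none : Option String), (some g : Option String), false))).reverse) := by
  intro l
  induction l with
  | nil => intro es out; rw [cmLoop2]; simp
  | cons x xs ih =>
    intro es out
    rw [cmLoop2]
    by_cases h : es.length < (x :: xs).reverse.length
    · have hlen : es.length ≤ xs.reverse.length := by simp at h ⊢; omega
      rw [if_pos h]
      split
      · rename_i e es' hp'
        rw [List.reverse_cons, PySem.List.pop?_last] at hp'
        simp only [Option.some.injEq, Prod.mk.injEq] at hp'
        obtain ⟨rfl, rfl⟩ := hp'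
        rw [ih, List.reverse_cons, List.take_append_of_le_length hlen,
            List.drop_append_of_le_length hlen]
        simp [List.append_assoc]
      · rename_i hp'
        rw [List.reverse_cons, PySem.List.pop?_last] at hp'
        simp at hp'
    · have hlen : (x :: xs).reverse.length ≤ es.length := by omega
      rw [if_neg h]
      rw [List.take_of_length_le hlen, List.drop_eq_nil_of_le hlen]
      simp

-- B's pairing loop on equal-length lists: the zipped compared pairs, emitted in reverse
theorem cmLoop3_spec :
    ∀ (le lg : List String) (out : List (Option String × Option String × Bool)),
      le.length = lg.length →
      cmLoop3 le.reverse lg.reverse out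
        = out ++ ((le.reverse.zip lg.reverse).map
            (fun p => ((some p.1 : Option String), (some p.2 : Option String),
                       PySem.Str.lower p.1 == PySem.Str.lower p.2))).reverse := by
  intro le
  induction le with
  | nil =>
    intro lg out hlen
    have : lg = [] := List.eq_nil_of_length_eq_zero hlen.symm
    subst this
    rw [cmLoop3]
    split
    · rename_i e es' hp'
      have := PySem.List.length_of_pop?_eq_some ([] : List String) hp'
      simp at this
    · simp
  | cons x xs ih =>
    intro lg out hlen
    cases lg with
    | nil => simp at hlen
    | cons y ys =>
      have hlen' : xs.length = ys.length := by simpa using hlen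
      rw [cmLoop3]
      split
      · rename_i e es' hpx
        rw [List.reverse_cons, PySem.List.pop?_last] at hpx
        simp only [Option.some.injEq, Prod.mk.injEq] at hpx
        obtain ⟨rfl, rfl⟩ := hpx
        split
        · rename_i g gs' hpy
          rw [List.reverse_cons, PySem.List.pop?_last] at hpy
          simp only [Option.some.injEq, Prod.mk.injEq] at hpy
          obtain ⟨rfl, rfl⟩ := hpy
          rw [ih ys _ hlen']
          rw [List.reverse_cons, List.reverse_cons,
              List.zip_append (by simpa using hlen')]
          simp [List.append_assoc]
        · rename_i hpy
          rw [List.reverse_cons, PySem.List.pop?_last] at hpy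
          simp at hpy
      · rename_i hpx
        rw [List.reverse_cons, PySem.List.pop?_last] at hpx
        simp at hpx

-- zip ignores trimming of either argument to the other's length
theorem zip_take_left_len {α β : Type} :
    ∀ (a : List α) (b : List β), (a.take b.length).zip b = a.zip b := by
  intro a
  induction a with
  | nil => intro b; simp
  | cons x xs ih =>
    intro b
    cases b with
    | nil => simp
    | cons y ys => simp [ih]

theorem zip_take_right_len {α β : Type} :
    ∀ (a : List α) (b : List β), a.zip (b.take a.length) = a.zip b := by
  intro a
  induction a with
  | nil => intro b; simp
  | cons x xs ih =>
    intro b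
    cases b with
    | nil => simp
    | cons y ys => simp [ih]

-- B's three loops assembled: pairs, then generated's tail, then expected's tail
theorem alt_eq (em gm : List String) :
    compare_moves_alt em gm
      = (em.zip gm).map
          (fun p => ((some p.1 : Option String), (some p.2 : Option String),
                     PySem.Str.lower p.1 == PySem.Str.lower p.2))
        ++ (gm.drop em.length).map
             (fun g => ((none : Option String), (some g : Option String), false))
        ++ (em.drop gm.length).map
             (fun e => ((some e : Option String), (none : Option String), false)) := by
  simp only [compare_moves_alt]
  have e1 := cmLoop1_spec em.reverse gm []
  rw [List.reverse_reverse] at e1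
  rw [e1]
  have e2 := cmLoop2_spec gm.reverse (em.take gm.length)
      ([] ++ (((em.drop gm.length)).map
        (fun e => ((some e : Option String), (none : Option String), false))).reverse)
  rw [List.reverse_reverse] at e2
  rw [e2]
  dsimp only
  have e3 := cmLoop3_spec (em.take gm.length).reverse
      (gm.take (em.take gm.length).length).reverse
      ([] ++ ((em.drop gm.length).map
          (fun e => ((some e : Option String), (none : Option String), false))).reverse
        ++ ((gm.drop (em.take gm.length).length).map
          (fun g => ((none : Option String), (some g : Option String), false))).reverse)
      (by simp [List.length_take]; try omega)
  rw [List.reverse_reverse, List.reverse_reverse] at e3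
  rw [e3, zip_take_right_len, zip_take_left_len]
  have hdropG : gm.drop (em.take gm.length).length = gm.drop em.length := by
    rw [List.length_take]
    rcases le_total em.length gm.length with h | h
    · rw [Nat.min_eq_right h]
    · rw [Nat.min_eq_left h, List.drop_length, List.drop_eq_nil_of_le h]
  rw [hdropG]
  simp [List.reverse_append, List.append_assoc]

-- ===== VERDICT (by name: the statement is the Claim_ definition above) =====
theorem compare_moves_spec : Claim_equal_compare_moves := by
  intro em gm _
  show compare_moves em gm = compare_moves_alt em gm
  simp only [compare_moves]
  rw [foldl_append_if_else, PySem.List.foldl_append_singleton_eq_map, List.nil_append]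
  have h1 := part1_eq em 0 em gm gm List.drop_zero List.drop_zero
  rw [Nat.cast_zero] at h1
  rw [h1, alt_eq]
  by_cases h : em.length ≤ gm.length
  · obtain ⟨d, hd⟩ : ∃ d, gm.length = em.length + d := ⟨gm.length - em.length, by omega⟩
    have h2 := range_map_eq_drop_map
      (fun g => ((none : Option String), (some g : Option String), false)) d em.length gm hd
    simp only at h2
    rw [h2]
    simp [List.drop_eq_nil_of_le h]
  · rw [PySem.List.pyRange_one_eq_nil (by exact_mod_cast le_of_lt (not_le.mp h))]
    rw [List.drop_eq_nil_of_le (le_of_lt (not_le.mp h))]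
    simp
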